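-- pv_equiv track=rewrite | github.com/caz777-draagyn/motm-backend | scripts/name_pool_text.py | canon_name
-- ===== SOURCE A (Python) =====
-- import unicodedata
--
-- def canon_name(raw: str) -> str:
--     """NFKC, title-case each space/hyphen chunk; keeps combining Latin letters."""
--     base = unicodedata.normalize("NFKC", (raw or "").strip()).replace("–", "-")
--     words: list[str] = []
--     for w in base.split():
--         parts = [p for p in w.split("-") if p.strip()]
--         if not parts:
--             continue
--         words.append("-".join(p[:1].upper() + p[1:].lower() if p else p for p in parts))
--     return " ".join(words)
-- ===== SOURCE B (Python) =====
-- import unicodedata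
--
-- def canon_name(raw: str) -> str:
--     """One-pass streaming title-case: same result as the nested-split version."""
--     base = unicodedata.normalize("NFKC", (raw or "")).replace("\u2013", "-")
--     words = []   # finished words (already '-'-joined)
--     parts = []   # finished parts of the current word
--     buf = []     # chars of the current part, already cased
--     for c in base:
--         if c.isspace():
--             if buf:
--                 parts.append("".join(buf)); buf = []
--             if parts:
--                 words.append("-".join(parts)); parts = []
--         elif c == "-":
--             if buf:
--                 parts.append("".join(buf)); buf = []
--         else:
--             buf.append(c.lower() if buf else c.upper())
--     if buf:
--         parts.append("".join(buf))
--     if parts: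
--         words.append("-".join(parts))
--     return " ".join(words)
-- ===== Notes on version B (the rewrite author's own statement) =====
-- stated objective: alternative
-- what changed: Replaces strip + whitespace-split + per-word hyphen-split + per-part slice-casing with a single character-by-character streaming pass over the string that maintains a word list, a part list and a cased buffer, flushing on separator boundaries.
import Mathlib
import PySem

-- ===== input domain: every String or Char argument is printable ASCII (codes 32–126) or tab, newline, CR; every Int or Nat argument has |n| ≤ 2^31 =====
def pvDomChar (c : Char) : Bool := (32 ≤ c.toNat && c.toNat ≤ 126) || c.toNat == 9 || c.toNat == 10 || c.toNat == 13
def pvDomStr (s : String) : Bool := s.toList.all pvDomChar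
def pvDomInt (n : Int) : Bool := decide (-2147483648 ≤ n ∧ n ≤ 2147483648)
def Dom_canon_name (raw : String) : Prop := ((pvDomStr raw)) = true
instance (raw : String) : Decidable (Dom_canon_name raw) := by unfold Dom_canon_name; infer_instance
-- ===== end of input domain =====

-- B replaces A's strip/split/split('-')/slice-case pipeline with one streaming pass; alternative decomposition, same cost.
-- NFKC normalization and the en-dash replacement are the identity on the printable-ASCII domain; both ports model them as such.

-- ===== PORT A =====
-- p[:1].upper() + p[1:].lower() if p else p
def capA (p : List Char) : List Char :=
  if p.isEmpty then p
  else PySem.Chars.upper (PySem.Chars.slice p none (some 1)) ++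
       PySem.Chars.lower (PySem.Chars.slice p (some 1) none)

def canon_name (raw : String) : String :=
  let base := PySem.Chars.strip raw.toList
  let words := (PySem.Chars.split₀ base).foldl (fun ws w =>
    let parts := (PySem.Chars.splitOn w ['-']).filter (fun p => !(PySem.Chars.strip p).isEmpty)
    if parts.isEmpty then ws
    else ws ++ [PySem.Chars.join ['-'] (parts.map capA)]) []
  String.ofList (PySem.Chars.join [' '] words)

-- ===== PORT B =====
-- state: (words, parts, buf); one step per character of base
def bStep (st : List (List Char) × List (List Char) × List Char) (c : Char) :
    List (List Char) × List (List Char) × List Char :=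
  let (words, parts, buf) := st
  if PySem.Chars.isspace c then
    let (parts, buf) := if buf.isEmpty then (parts, buf) else (parts ++ [buf], ([] : List Char))
    if parts.isEmpty then (words, parts, buf)
    else (words ++ [PySem.Chars.join ['-'] parts], [], buf)
  else if c = '-' then
    if buf.isEmpty then (words, parts, buf) else (words, parts ++ [buf], [])
  else
    (words, parts, buf ++ [if buf.isEmpty then PySem.Chars.upperChar c else PySem.Chars.lowerChar c])

def canon_name_alt (raw : String) : String :=
  let st := raw.toList.foldl bStep ([], [], [])
  let words := st.1
  let parts := if st.2.2.isEmpty then st.2.1 else st.2.1 ++ [st.2.2]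
  let words := if parts.isEmpty then words else words ++ [PySem.Chars.join ['-'] parts]
  String.ofList (PySem.Chars.join [' '] words)

-- ===== PRECONDITION & SPEC =====
def Spec_canon_name (raw : String) (out : String) : Prop := out = canon_name_alt raw
instance (raw : String) (out : String) : Decidable (Spec_canon_name raw out) := by unfold Spec_canon_name; infer_instance

-- ===== CLAIM (what is proved, stated in full; the proofs are below) =====
def Claim_equal_canon_name : Prop := ∀ (raw : String), Dom_canon_name raw → Spec_canon_name raw (canon_name raw)

-- ===== LEMMAS AND PROOFS =====

-- ---- reference recursions used only by the proofs ----

/-- Python `s.split()` as a forward recursion. -/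
def wordsRec (cs : List Char) : List (List Char) :=
  match cs with
  | [] => []
  | c :: r =>
    if PySem.Chars.isspace c then wordsRec r
    else (c :: r.takeWhile (fun d => !PySem.Chars.isspace d)) ::
         wordsRec (r.dropWhile (fun d => !PySem.Chars.isspace d))
termination_by cs.length
decreasing_by
  · simp
  · exact Nat.lt_of_le_of_lt (List.length_dropWhile_le _ _) (by simp)

/-- Python `w.split('-')` as a forward recursion (keeps empty pieces). -/
def hsplit : List Char → List (List Char)
  | [] => [[]]
  | c :: r => if c = '-' then [] :: hsplit r else
      match hsplit r with
      | [] => [[c]]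
      | s :: ss => (c :: s) :: ss

def capSeg (p : List Char) : List Char :=
  match p with
  | [] => []
  | c :: t => PySem.Chars.upperChar c :: t.map PySem.Chars.lowerChar

def flushP (parts : List (List Char)) (buf : List Char) : List (List Char) :=
  if buf.isEmpty then parts else parts ++ [buf]

def finishW (parts : List (List Char)) (buf : List Char) : List (List Char) :=
  if (flushP parts buf).isEmpty then [] else [PySem.Chars.join ['-'] (flushP parts buf)]

def casedChar (buf : List Char) (c : Char) : Char :=
  if buf.isEmpty then PySem.Chars.upperChar c else PySem.Chars.lowerChar c

/-- bStep restricted to non-whitespace characters: only (parts, buf) changes. -/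
def innerStep (st : List (List Char) × List Char) (c : Char) : List (List Char) × List Char :=
  if c = '-' then (flushP st.1 st.2, [])
  else (st.1, st.2 ++ [casedChar st.2 c])

/-- cased continuation of `buf` through the `-`-segments `segs`, flushed at the end. -/
def gSegs : List Char → List (List Char) → List (List Char)
  | buf, [] => if buf.isEmpty then [] else [buf]
  | buf, s :: ss =>
      let b' := buf ++ (if buf.isEmpty then capSeg s else s.map PySem.Chars.lowerChar)
      (if b'.isEmpty then [] else [b']) ++ gSegs [] ss

def noWS (cs : List Char) : Prop := ∀ c ∈ cs, PySem.Chars.isspace c = false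

/-- what A contributes for one whitespace-delimited word -/
def AWord (w : List Char) : List (List Char) :=
  let parts := (PySem.Chars.splitOn w ['-']).filter (fun p => !(PySem.Chars.strip p).isEmpty)
  if parts.isEmpty then [] else [PySem.Chars.join ['-'] (parts.map capA)]

/-- B's words over the tail `cs` from mid-state (parts, buf). -/
def wordsB (parts : List (List Char)) (buf : List Char) : List Char → List (List Char)
  | [] => finishW parts buf
  | c :: r =>
    if PySem.Chars.isspace c then finishW parts buf ++ wordsB [] [] r
    else if c = '-' then wordsB (flushP parts buf) [] r
    else wordsB parts (buf ++ [casedChar buf c]) r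


def mapHead (f : List Char → List Char) : List (List Char) → List (List Char)
  | [] => []
  | s :: ss => f s :: ss

lemma mapHead_id (l : List (List Char)) : mapHead (fun x => x) l = l := by
  cases l <;> simp [mapHead]

lemma wordsRec_cons (c : Char) (r : List Char) :
    wordsRec (c :: r) = if PySem.Chars.isspace c then wordsRec r
      else (c :: r.takeWhile (fun d => !PySem.Chars.isspace d)) ::
           wordsRec (r.dropWhile (fun d => !PySem.Chars.isspace d)) := by
  rw [wordsRec]

lemma flushP_eq (parts : List (List Char)) (buf : List Char) :
    flushP parts buf = parts ++ (if buf.isEmpty then [] else [buf]) := by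
  by_cases h : buf.isEmpty <;> simp [flushP, h]

-- ---- split₀ = wordsRec ----

lemma wordsRec_single (w : List Char) (hw : noWS w) (hne : w ≠ []) : wordsRec w = [w] := by
  cases w with
  | nil => exact absurd rfl hne
  | cons c t =>
    rw [wordsRec]
    have hc : PySem.Chars.isspace c = false := hw c (by simp)
    have ht : ∀ d ∈ t, (!PySem.Chars.isspace d) = true := fun d hd => by
      simp [hw d (by simp [hd])]
    rw [if_neg (by simp [hc]), List.takeWhile_eq_self_iff.mpr ht,
        List.dropWhile_eq_nil_iff.mpr ht, wordsRec]

lemma wordsRec_word_cons (w : List Char) (hw : noWS w) (hne : w ≠ []) (c : Char)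
    (hc : PySem.Chars.isspace c = true) (r : List Char) :
    wordsRec (w ++ c :: r) = w :: wordsRec r := by
  cases w with
  | nil => exact absurd rfl hne
  | cons c0 t =>
    rw [List.cons_append, wordsRec]
    have hc0 : PySem.Chars.isspace c0 = false := hw c0 (by simp)
    have ht : ∀ d ∈ t, (!PySem.Chars.isspace d) = true := fun d hd => by
      simp [hw d (by simp [hd])]
    rw [if_neg (by simp [hc0]), List.takeWhile_append, List.dropWhile_append,
        List.takeWhile_eq_self_iff.mpr ht,
        List.dropWhile_eq_nil_iff.mpr ht]
    simp only [List.length_nil, List.isEmpty_nil, if_true, List.takeWhile_cons, List.dropWhile_cons, hc]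
    simp [wordsRec, hc]

lemma split₀_go_eq (cs : List Char) : ∀ cur acc, noWS cur →
    PySem.Chars.split₀.go cs cur acc = acc.reverse ++ wordsRec (cur.reverse ++ cs) := by
  induction cs with
  | nil =>
    intro cur acc hcur
    rw [PySem.Chars.split₀.go]
    by_cases h : cur.isEmpty
    · have : cur = [] := by simpa using h
      simp [this, h, wordsRec]
    · have hne : cur.reverse ≠ [] := by simp [List.isEmpty_iff.not.mp h]
      have : noWS cur.reverse := fun d hd => hcur d (by simpa using hd)
      rw [if_neg h, List.append_nil, wordsRec_single _ this hne]
      simp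
  | cons c rest ih =>
    intro cur acc hcur
    rw [PySem.Chars.split₀.go]
    by_cases hc : PySem.Chars.isspace c = true
    · rw [if_pos hc]
      by_cases h : cur.isEmpty
      · have hnil : cur = [] := by simpa using h
        rw [if_pos h, ih [] acc (by simp [noWS])]
        simp [hnil, wordsRec, hc]
      · have hne : cur.reverse ≠ [] := by simp [List.isEmpty_iff.not.mp h]
        have hrev : noWS cur.reverse := fun d hd => hcur d (by simpa using hd)
        rw [if_neg h, ih [] (cur.reverse :: acc) (by simp [noWS]),
            wordsRec_word_cons _ hrev hne c hc rest]
        simp [wordsRec]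
    · rw [if_neg hc, ih (c :: cur) acc (fun d hd => by
        rcases List.mem_cons.mp hd with h | h
        · subst h; simpa using hc
        · exact hcur d h)]
      simp [wordsRec]

lemma split₀_eq (cs : List Char) : PySem.Chars.split₀ cs = wordsRec cs := by
  rw [PySem.Chars.split₀, split₀_go_eq cs [] [] (by simp [noWS])]
  simp

-- ---- wordsRec ignores stripping ----

lemma wordsRec_all_space (t : List Char) (ht : ∀ c ∈ t, PySem.Chars.isspace c = true) :
    wordsRec t = [] := by
  induction t with
  | nil => rw [wordsRec]
  | cons c r ih =>
    rw [wordsRec, if_pos (ht c (by simp))]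
    exact ih (fun d hd => ht d (by simp [hd]))

lemma wordsRec_append_spaces_aux (n : Nat) : ∀ a t, a.length ≤ n →
    (∀ c ∈ t, PySem.Chars.isspace c = true) → wordsRec (a ++ t) = wordsRec a := by
  induction n with
  | zero =>
    intro a t ha ht
    have : a = [] := List.length_eq_zero_iff.mp (Nat.le_zero.mp ha)
    subst this
    simpa [wordsRec] using wordsRec_all_space t ht
  | succ n ih =>
    intro a t ha ht
    cases a with
    | nil => simpa [wordsRec] using wordsRec_all_space t ht
    | cons c r =>
      rw [List.cons_append, wordsRec, wordsRec]
      by_cases hc : PySem.Chars.isspace c = true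
      · rw [if_pos hc, if_pos hc]
        exact ih r t (by simpa using Nat.lt_succ_iff.mp (by simpa using ha)) ht
      · rw [if_neg hc, if_neg hc, List.takeWhile_append, List.dropWhile_append]
        by_cases hd : (r.dropWhile (fun d => !PySem.Chars.isspace d)).isEmpty
        · have hall : r.takeWhile (fun d => !PySem.Chars.isspace d) = r := by
            have := List.takeWhile_append_dropWhile
              (p := fun d => !PySem.Chars.isspace d) (l := r)
            rw [List.isEmpty_iff.mp hd, List.append_nil] at this
            exact this
          rw [if_pos hd, if_pos (by rw [hall])]
          have htw : t.takeWhile (fun d => !PySem.Chars.isspace d) = [] := by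
            cases t with
            | nil => rfl
            | cons x xs => simp [List.takeWhile_cons, ht x (by simp)]
          have hdw : t.dropWhile (fun d => !PySem.Chars.isspace d) = t := by
            cases t with
            | nil => rfl
            | cons x xs => simp [List.dropWhile_cons, ht x (by simp)]
          rw [htw, hdw, List.append_nil, hall, wordsRec_all_space t ht,
              List.dropWhile_eq_nil_iff.mpr]
          · rw [wordsRec]
          · intro d hdm
            have hmem : d ∈ r.takeWhile (fun d => !PySem.Chars.isspace d) := by rw [hall]; exact hdm
            simpa using List.mem_takeWhile_imp hmem
        · have hlen : (r.takeWhile (fun d => !PySem.Chars.isspace d)).length ≠ r.length := by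
            intro hl
            have := List.takeWhile_eq_self_iff (p := fun d => !PySem.Chars.isspace d) (l := r)
            have hself : r.takeWhile (fun d => !PySem.Chars.isspace d) = r :=
              (List.takeWhile_sublist _).eq_of_length hl
            have hnil : r.dropWhile (fun d => !PySem.Chars.isspace d) = [] := by
              have h2 := List.takeWhile_append_dropWhile
                (p := fun d => !PySem.Chars.isspace d) (l := r)
              rw [hself] at h2
              simpa using h2
            simp [hnil] at hd
          rw [if_neg hd, if_neg hlen]
          have hrt : wordsRec (r.dropWhile (fun d => !PySem.Chars.isspace d) ++ t)
              = wordsRec (r.dropWhile (fun d => !PySem.Chars.isspace d)) := by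
            apply ih _ t _ ht
            calc (r.dropWhile (fun d => !PySem.Chars.isspace d)).length
                ≤ r.length := List.length_dropWhile_le _ _
              _ ≤ n := Nat.lt_succ_iff.mp (by simpa using ha)
          rw [hrt]

lemma wordsRec_append_spaces (a t : List Char) (ht : ∀ c ∈ t, PySem.Chars.isspace c = true) :
    wordsRec (a ++ t) = wordsRec a :=
  wordsRec_append_spaces_aux a.length a t le_rfl ht

lemma wordsRec_lstrip (cs : List Char) :
    wordsRec (cs.dropWhile PySem.Chars.isspace) = wordsRec cs := by
  induction cs with
  | nil => rfl
  | cons c r ih =>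
    by_cases hc : PySem.Chars.isspace c = true
    · rw [List.dropWhile_cons, if_pos (by simp [hc]), ih, wordsRec, if_pos hc]
    · rw [List.dropWhile_cons, if_neg (by simp [hc])]

lemma wordsRec_strip (cs : List Char) : wordsRec (PySem.Chars.strip cs) = wordsRec cs := by
  rw [PySem.Chars.strip, PySem.Chars.lstrip, PySem.Chars.rstrip]
  set l := cs.dropWhile PySem.Chars.isspace with hl
  have hsplit : l = (l.reverse.dropWhile PySem.Chars.isspace).reverse
      ++ (l.reverse.takeWhile PySem.Chars.isspace).reverse := by
    calc l = l.reverse.reverse := by simp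
    _ = (l.reverse.takeWhile PySem.Chars.isspace ++ l.reverse.dropWhile PySem.Chars.isspace).reverse := by
        rw [List.takeWhile_append_dropWhile]
    _ = _ := by rw [List.reverse_append]
  calc wordsRec (l.reverse.dropWhile PySem.Chars.isspace).reverse
      = wordsRec ((l.reverse.dropWhile PySem.Chars.isspace).reverse
          ++ (l.reverse.takeWhile PySem.Chars.isspace).reverse) := by
        rw [wordsRec_append_spaces]
        intro c hc
        exact List.mem_takeWhile_imp (List.mem_reverse.mp hc)
    _ = wordsRec l := by rw [← hsplit]
    _ = wordsRec cs := wordsRec_lstrip cs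

-- ---- splitOn '-' = hsplit ----

lemma hsplit_ne_nil (w : List Char) : hsplit w ≠ [] := by
  cases w with
  | nil => simp [hsplit]
  | cons c r =>
    rw [hsplit]
    by_cases h : c = '-'
    · simp [h]
    · rw [if_neg h]
      cases hsplit r <;> simp

lemma splitOn_go_eq (fuel : Nat) : ∀ l cur acc, l.length < fuel →
    PySem.Chars.splitOn.go ['-'] fuel l cur acc
      = acc.reverse ++ mapHead (fun x => cur.reverse ++ x) (hsplit l) := by
  induction fuel with
  | zero => intro l cur acc h; omega
  | succ n ih =>
    intro l cur acc h
    cases l with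
    | nil =>
      rw [PySem.Chars.splitOn.go]
      · simp [hsplit, mapHead]
      · omega
    | cons c rest =>
      rw [PySem.Chars.splitOn.go]
      by_cases hc : c = '-'
      · rw [if_pos (by simp [hc]), ih _ _ _ (by simpa using h)]
        subst hc
        simp only [List.length_cons, List.drop_succ_cons]
        rw [hsplit, if_pos rfl]
        rcases h' : hsplit rest with _ | ⟨s, ss⟩
        · exact absurd h' (hsplit_ne_nil rest)
        · simp [h', mapHead]
      · rw [if_neg (by simp [List.isPrefixOf, Ne.symm hc]),
            ih _ _ _ (by simpa using Nat.lt_of_succ_lt_succ (by simpa using h))]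
        rw [hsplit, if_neg hc]
        rcases h' : hsplit rest with _ | ⟨s, ss⟩
        · exact absurd h' (hsplit_ne_nil rest)
        · simp [mapHead]

lemma splitOn_eq_hsplit (w : List Char) : PySem.Chars.splitOn w ['-'] = hsplit w := by
  rw [PySem.Chars.splitOn, splitOn_go_eq (w.length + 1) w [] [] (by omega)]
  simp [mapHead_id]

lemma hsplit_mem_subset (w : List Char) (p : List Char) (hp : p ∈ hsplit w) :
    ∀ c ∈ p, c ∈ w := by
  induction w generalizing p with
  | nil =>
    rw [hsplit] at hp
    simp at hp
    simp [hp]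
  | cons c r ih =>
    rw [hsplit] at hp
    by_cases hc : c = '-'
    · rw [if_pos hc] at hp
      rcases List.mem_cons.mp hp with h | h
      · simp [h]
      · intro d hd
        exact List.mem_cons_of_mem _ (ih p h d hd)
    · rw [if_neg hc] at hp
      rcases h' : hsplit r with _ | ⟨s, ss⟩
      · exact absurd h' (hsplit_ne_nil r)
      · rw [h'] at hp
        rcases List.mem_cons.mp hp with h | h
        · subst h
          intro d hd
          rcases List.mem_cons.mp hd with h | h
          · simp [h]
          · exact List.mem_cons_of_mem _ (ih s (by rw [h']; simp) d h)
        · intro d hd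
          exact List.mem_cons_of_mem _ (ih p (by rw [h']; simp [h]) d hd)

-- ---- casing ----

lemma dropWhile_noWS (p : List Char) (hp : noWS p) :
    p.dropWhile PySem.Chars.isspace = p := by
  cases p with
  | nil => rfl
  | cons c t => rw [List.dropWhile_cons, if_neg (by simp [hp c (by simp)])]

lemma strip_noWS (p : List Char) (hp : noWS p) : PySem.Chars.strip p = p := by
  rw [PySem.Chars.strip, PySem.Chars.lstrip, PySem.Chars.rstrip, dropWhile_noWS p hp,
      dropWhile_noWS p.reverse (fun d hd => hp d (List.mem_reverse.mp hd))]
  simp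

lemma capA_eq_capSeg (p : List Char) (hne : p ≠ []) : capA p = capSeg p := by
  cases p with
  | nil => exact absurd rfl hne
  | cons c t =>
    rw [capA, if_neg (by simp)]
    simp only [PySem.Chars.slice_eq_listSlice]
    have h1 : PySem.List.slice (c :: t) none (some 1) = [c] := by
      simp [PySem.List.slice, PySem.List.clampIdx]
    have h2 : PySem.List.slice (c :: t) (some 1) none = t := by
      simp [PySem.List.slice, PySem.List.clampIdx]
    rw [h1, h2, capSeg]
    simp [PySem.Chars.upper, PySem.Chars.lower]

-- ---- B's word-internal loop ----

lemma gSegs_nil_eq (segs : List (List Char)) :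
    gSegs [] segs = (segs.filter (fun p => !p.isEmpty)).map capSeg := by
  induction segs with
  | nil => rfl
  | cons s ss ih =>
    rw [gSegs]
    cases s with
    | nil => simpa [capSeg, List.filter] using ih
    | cons c t => simpa [capSeg, List.filter] using congrArg (capSeg (c :: t) :: ·) ih

lemma foldl_innerStep_flush (w : List Char) : ∀ parts buf,
    flushP ((w.foldl innerStep (parts, buf)).1) ((w.foldl innerStep (parts, buf)).2)
      = parts ++ gSegs buf (hsplit w) := by
  induction w with
  | nil =>
    intro parts buf
    rw [hsplit, List.foldl_nil, gSegs, flushP_eq]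
    by_cases h : buf.isEmpty <;> simp [gSegs, h, capSeg]
  | cons c r ih =>
    intro parts buf
    rw [List.foldl_cons, hsplit]
    by_cases hc : c = '-'
    · rw [if_pos hc, innerStep, if_pos (by simp [hc]), ih, gSegs]
      by_cases h : buf.isEmpty
      · simp [flushP_eq, h, capSeg, gSegs]
      · simp [flushP_eq, h, capSeg, gSegs]
    · rw [if_neg hc, innerStep, if_neg (by simp [hc]), ih]
      rcases h' : hsplit r with _ | ⟨s, ss⟩
      · exact absurd h' (hsplit_ne_nil r)
      · rw [gSegs, gSegs]
        by_cases h : buf.isEmpty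
        · have hb : buf = [] := by simpa using h
          simp [hb, casedChar, capSeg]
        · simp only [h, if_neg, Bool.false_eq_true, if_false, casedChar]
          have : buf ++ [PySem.Chars.lowerChar c] ++ s.map PySem.Chars.lowerChar
              = buf ++ (c :: s).map PySem.Chars.lowerChar := by simp
          rw [List.append_assoc]
          simp [h, this, List.isEmpty_iff, List.append_ne_nil_of_right_ne_nil]

lemma bStep_eq_innerStep (words parts : List (List Char)) (buf : List Char) (c : Char)
    (hc : PySem.Chars.isspace c = false) :
    bStep (words, parts, buf) c = (words, innerStep (parts, buf) c) := by
  rw [bStep, innerStep]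
  simp only [hc, Bool.false_eq_true, if_false]
  by_cases h : c = '-'
  · by_cases hb : buf.isEmpty
    · have hbn : buf = [] := by simpa using hb
      simp [h, flushP, hb, hbn]
    · simp [h, flushP, hb]
  · simp [h, casedChar]

lemma bStep_space (words parts : List (List Char)) (buf : List Char) (c : Char)
    (hc : PySem.Chars.isspace c = true) :
    bStep (words, parts, buf) c = (words ++ finishW parts buf, [], []) := by
  rw [bStep, finishW]
  by_cases hb : buf.isEmpty
  · have hbn : buf = [] := by simpa using hb
    by_cases hp : parts.isEmpty
    · have : parts = [] := by simpa using hp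
      simp [hc, hb, flushP, hbn, this, hp]
    · simp [hc, flushP, hbn, hp]
  · have hp : (parts ++ [buf]).isEmpty = false := by simp
    simp [hc, hb, flushP, hp]

lemma wordsB_chunk (w : List Char) (hw : noWS w) : ∀ parts buf r,
    wordsB parts buf (w ++ r)
      = wordsB ((w.foldl innerStep (parts, buf)).1) ((w.foldl innerStep (parts, buf)).2) r := by
  induction w with
  | nil => intro parts buf r; rfl
  | cons c t ih =>
    intro parts buf r
    have hc : PySem.Chars.isspace c = false := hw c (by simp)
    have ht : noWS t := fun d hd => hw d (by simp [hd])
    rw [List.cons_append, wordsB, if_neg (by simp [hc]), List.foldl_cons, innerStep]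
    by_cases h : c = '-'
    · rw [if_pos h, if_pos (by simp [h])]
      exact ih ht _ _ r
    · rw [if_neg h, if_neg (by simp [h])]
      exact ih ht _ _ r

-- ---- B's fold = wordsB ----

lemma foldl_bStep_eq (cs : List Char) : ∀ words parts buf,
    (let st := cs.foldl bStep (words, parts, buf);
     st.1 ++ finishW st.2.1 st.2.2) = words ++ wordsB parts buf cs := by
  induction cs with
  | nil => intro words parts buf; rfl
  | cons c r ih =>
    intro words parts buf
    simp only [List.foldl_cons]
    by_cases hc : PySem.Chars.isspace c = true
    · rw [bStep_space words parts buf c hc, ih, wordsB, if_pos hc, List.append_assoc]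
    · rw [bStep_eq_innerStep words parts buf c (by simpa using hc), ih, wordsB,
          if_neg hc, innerStep]
      by_cases h : c = '-'
      · rw [if_pos h, if_pos (by simp [h])]
      · rw [if_neg h, if_neg (by simp [h])]

-- ---- glue: wordsB = flatMap AWord over wordsRec ----

lemma AWord_eq (w : List Char) (hw : noWS w) :
    AWord w = finishW ((w.foldl innerStep ([], [])).1) ((w.foldl innerStep ([], [])).2) := by
  rw [AWord, finishW, foldl_innerStep_flush w [] [], List.nil_append, gSegs_nil_eq,
      splitOn_eq_hsplit]
  have hfe : (hsplit w).filter (fun p => !(PySem.Chars.strip p).isEmpty)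
      = (hsplit w).filter (fun p => !p.isEmpty) := by
    apply List.filter_congr
    intro p hp
    rw [strip_noWS p (fun d hd => hw d (hsplit_mem_subset w p hp d hd))]
  rw [hfe]
  have hmape : ((hsplit w).filter (fun p => !p.isEmpty)).map capA
      = ((hsplit w).filter (fun p => !p.isEmpty)).map capSeg := by
    apply List.map_congr_left
    intro p hp
    have := (List.mem_filter.mp hp).2
    exact capA_eq_capSeg p (by simpa using this)
  rw [hmape]
  by_cases h : ((hsplit w).filter (fun p => !p.isEmpty)).isEmpty
  · have : (hsplit w).filter (fun p => !p.isEmpty) = [] := by simpa using h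
    simp [this]
  · have hne : (hsplit w).filter (fun p => !p.isEmpty) ≠ [] := by simpa using h
    rw [if_neg (by simpa using h), if_neg (by simp [hne])]

lemma wordsB_eq_AWords_aux (n : Nat) : ∀ cs : List Char, cs.length ≤ n →
    wordsB [] [] cs = (wordsRec cs).flatMap AWord := by
  induction n with
  | zero =>
    intro cs h
    have : cs = [] := List.length_eq_zero_iff.mp (Nat.le_zero.mp h)
    subst this
    simp [wordsB, wordsRec, finishW, flushP]
  | succ n ih =>
    intro cs h
    cases cs with
    | nil => simp [wordsB, wordsRec, finishW, flushP]
    | cons c r =>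
      by_cases hc : PySem.Chars.isspace c = true
      · rw [wordsB, if_pos hc, wordsRec_cons, if_pos hc, finishW]
        simp only [flushP, List.isEmpty_nil, if_true]
        exact congrArg ([] ++ ·) (ih r (by simpa using Nat.lt_succ_iff.mp (by simpa using h)))
      · have hw : noWS (c :: r.takeWhile (fun d => !PySem.Chars.isspace d)) := by
          intro d hd
          rcases List.mem_cons.mp hd with h' | h'
          · subst h'; simpa using hc
          · simpa using List.mem_takeWhile_imp h'
        have hsplitcs : c :: r
            = (c :: r.takeWhile (fun d => !PySem.Chars.isspace d))
              ++ r.dropWhile (fun d => !PySem.Chars.isspace d) := by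
          rw [List.cons_append, List.takeWhile_append_dropWhile]
        rw [wordsRec_cons, if_neg hc, hsplitcs, wordsB_chunk _ hw [] []]
        cases hr'c : r.dropWhile (fun d => !PySem.Chars.isspace d) with
        | nil =>
          rw [wordsB, ← AWord_eq _ hw]
          simp [wordsRec]
        | cons s r2 =>
          have hs : PySem.Chars.isspace s = true := by
            have h2 := List.head?_dropWhile_not (fun d => !PySem.Chars.isspace d) r
            rw [hr'c] at h2
            simpa using h2
          have hlen : r2.length ≤ n := by
            have h1 := List.length_dropWhile_le (fun d => !PySem.Chars.isspace d) r
            rw [hr'c] at h1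
            simp only [List.length_cons] at h1 h
            omega
          rw [wordsB, if_pos hs, ← AWord_eq _ hw, ih r2 hlen,
              wordsRec_cons, if_pos hs]
          simp

lemma wordsB_eq_AWords (cs : List Char) : wordsB [] [] cs = (wordsRec cs).flatMap AWord :=
  wordsB_eq_AWords_aux cs.length cs le_rfl

-- ---- the two ports, rewritten ----

lemma canon_name_eq (raw : String) :
    canon_name raw = String.ofList (PySem.Chars.join [' '] ((wordsRec raw.toList).flatMap AWord)) := by
  rw [canon_name]
  simp only [split₀_eq, wordsRec_strip]
  have hstep : ∀ (ws : List (List Char)) (w : List Char), w ∈ wordsRec raw.toList →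
      (fun (ws : List (List Char)) (w : List Char) =>
        if (List.filter (fun p => !(PySem.Chars.strip p).isEmpty) (PySem.Chars.splitOn w ['-'])).isEmpty then ws
        else ws ++ [PySem.Chars.join ['-']
          (List.map capA (List.filter (fun p => !(PySem.Chars.strip p).isEmpty) (PySem.Chars.splitOn w ['-'])))]) ws w
      = (fun (ws : List (List Char)) (w : List Char) => ws ++ AWord w) ws w := by
    intro ws w _
    simp only [AWord]
    by_cases h : ((PySem.Chars.splitOn w ['-']).filter (fun p => !(PySem.Chars.strip p).isEmpty)).isEmpty
    · simp [h]
    · simp [h]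
  have h1 := PySem.List.foldl_congr_mem _ _ _ ([] : List (List Char)) hstep
  rw [h1, PySem.List.foldl_append_eq_flatMap AWord]
  simp

lemma canon_name_alt_eq (raw : String) :
    canon_name_alt raw = String.ofList (PySem.Chars.join [' '] (wordsB [] [] raw.toList)) := by
  rw [canon_name_alt]
  have h := foldl_bStep_eq raw.toList [] [] []
  simp only [List.nil_append] at h
  congr 1
  rw [← h]
  set st := raw.toList.foldl bStep ([], [], []) with hst
  rw [finishW]
  by_cases hb : st.2.2.isEmpty
  · have : flushP st.2.1 st.2.2 = st.2.1 := by rw [flushP, if_pos hb]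
    rw [this]
    by_cases hp : st.2.1.isEmpty
    · simp [hb, hp]
    · simp [hb, hp]
  · have : flushP st.2.1 st.2.2 = st.2.1 ++ [st.2.2] := by rw [flushP, if_neg hb]
    rw [this]
    simp [hb]

-- ===== VERDICT (by name: the statement is the Claim_ definition above) =====
theorem canon_name_spec : Claim_equal_canon_name := by
  intro raw _
  unfold Spec_canon_name
  rw [canon_name_eq, canon_name_alt_eq, wordsB_eq_AWords]
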